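-- pv_equiv track=rewrite | github.com/wangxunx/FlyDSL | python/flydsl/expr/rocdl/tdm_ops.py | compute_warp_distribution
-- ===== SOURCE A (Python) =====
-- from typing import Optional, Sequence, Tuple, Union
--
-- def compute_warp_distribution(
--     block_shape: Sequence[int],
--     num_warps: int,
-- ) -> Tuple[list, list]:
--     """Compute per-warp block sub-tile after distributing warps.
--
--     Mirrors Triton's tdmGetWarpDistribution + tdmGetAdjustedBlockShape
--     from TDMCommon.h.
--
--     Args:
--         block_shape: Full tile shape, e.g. [tile_m, tile_k].
--         num_warps:   Total number of warps in the workgroup.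
--
--     Returns:
--         (warps_per_dim, block_per_warp) — how many warps along each dim
--         and the sub-tile size each warp handles.
--     """
--     ndims = len(block_shape)
--     warps = [1] * ndims
--     remaining = num_warps
--     for i in range(ndims):
--         while remaining > 1 and warps[i] * 2 <= block_shape[i]:
--             warps[i] *= 2
--             remaining //= 2
--     if remaining > 1:
--         warps[-1] *= remaining
--     block_per_warp = [
--         (block_shape[i] + warps[i] - 1) // warps[i]
--         for i in range(ndims)
--     ]
--     return warps, block_per_warp
-- ===== SOURCE B (Python) =====
-- def _flog2(x):
--     # floor(log2(x)) for x >= 2, else 0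
--     return x.bit_length() - 1 if x >= 2 else 0
--
--
-- def compute_warp_distribution(block_shape, num_warps):
--     warps = []
--     remaining = num_warps
--     for b in block_shape:
--         s = min(_flog2(b), _flog2(remaining))
--         warps.append(1 << s)
--         remaining //= (1 << s)
--     if remaining > 1:
--         warps[-1] *= remaining
--     block_per_warp = [(b + w - 1) // w for b, w in zip(block_shape, warps)]
--     return warps, block_per_warp
-- ===== Notes on version B (the rewrite author's own statement) =====
-- stated objective: simpler
-- what changed: Replaces the indexed loop with mutation plus an inner doubling while-loop by a single structural pass that computes each dimension's power-of-two warp count in closed form from bit lengths (s = min(flog2(dim), flog2(remaining)); warps[i] = 1<<s; remaining >>= s), and builds block_per_warp by zipping instead of indexing.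
import Mathlib
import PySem

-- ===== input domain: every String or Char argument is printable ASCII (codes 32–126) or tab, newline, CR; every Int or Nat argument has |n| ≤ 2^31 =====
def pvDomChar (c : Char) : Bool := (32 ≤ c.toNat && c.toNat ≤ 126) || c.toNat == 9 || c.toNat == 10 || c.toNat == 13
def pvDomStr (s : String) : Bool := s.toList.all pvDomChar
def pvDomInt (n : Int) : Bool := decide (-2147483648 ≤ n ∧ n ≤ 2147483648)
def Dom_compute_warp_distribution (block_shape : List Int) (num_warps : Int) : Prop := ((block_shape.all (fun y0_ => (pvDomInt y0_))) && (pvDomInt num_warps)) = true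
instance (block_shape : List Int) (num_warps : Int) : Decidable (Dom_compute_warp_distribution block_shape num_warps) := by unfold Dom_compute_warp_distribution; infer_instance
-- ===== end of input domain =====

-- B replaces A's inner doubling while-loop and index-mutation pass by one structural pass
-- computing each warp count in closed form from bit lengths (objective: simpler).
-- On empty block_shape with num_warps > 1 both Pythons raise IndexError (excluded by Pre_).


-- ===== PORT A =====
-- the inner `while remaining > 1 and warps[i] * 2 <= block_shape[i]` loop
def pvInnerA (b w r : Int) : Int × Int :=
  if h : 1 < r ∧ w * 2 ≤ b then pvInnerA b (w * 2) (PySem.Int.floordiv r 2)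
  else (w, r)
termination_by r.toNat
decreasing_by
  rw [PySem.Int.floordiv_eq_ediv_of_pos (by omega : (0:Int) < 2)]
  omega

-- one iteration of A's `for i in range(ndims)` loop (state: warps list, remaining)
def pvStepA (bs : List Int) (st : List Int × Int) (i : Nat) : List Int × Int :=
  let p := pvInnerA (bs.getD i 0) (st.1.getD i 0) st.2
  (st.1.set i p.1, p.2)

def compute_warp_distribution (block_shape : List Int) (num_warps : Int) : List Int × List Int :=
  let ndims := block_shape.length
  let st := (List.range ndims).foldl (pvStepA block_shape) (List.replicate ndims (1:Int), num_warps)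
  -- `warps[-1] *= remaining` (Python raises on empty list there; excluded by Pre_)
  let warps := if 1 < st.2 then st.1.set (ndims - 1) (st.1.getD (ndims - 1) 0 * st.2) else st.1
  (warps, (List.range ndims).map (fun i =>
      PySem.Int.floordiv (block_shape.getD i 0 + warps.getD i 0 - 1) (warps.getD i 0)))

-- ===== PORT B =====
-- _flog2(x) = x.bit_length() - 1 if x >= 2 else 0
def pvFlog2 (x : Int) : Nat :=
  if 2 ≤ x then PySem.Int.bitLength x - 1 else 0

-- B's single pass: per dimension the closed-form power-of-two allocation
def pvAltLoop : List Int → Int → List Int × Int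
  | [], r => ([], r)
  | b :: rest, r =>
    let s := min (pvFlog2 b) (pvFlog2 r)
    let p := pvAltLoop rest (PySem.Int.floordiv r ((2:Int) ^ s))
    (((2:Int) ^ s) :: p.1, p.2)

def compute_warp_distribution_alt (block_shape : List Int) (num_warps : Int) : List Int × List Int :=
  let p := pvAltLoop block_shape num_warps
  -- `warps[-1] *= remaining` (Python raises on empty list there; excluded by Pre_)
  let warps := if 1 < p.2 then p.1.set (block_shape.length - 1) (p.1.getD (block_shape.length - 1) 0 * p.2) else p.1
  (warps, (block_shape.zip warps).map (fun bw => PySem.Int.floordiv (bw.1 + bw.2 - 1) bw.2))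

-- ===== PRECONDITION & SPEC =====
-- Pre_ excludes only empty block_shape with num_warps > 1, where BOTH Pythons raise IndexError at warps[-1].
def Pre_compute_warp_distribution (block_shape : List Int) (num_warps : Int) : Prop :=
  ¬ (block_shape = [] ∧ 1 < num_warps)
instance (block_shape : List Int) (num_warps : Int) : Decidable (Pre_compute_warp_distribution block_shape num_warps) := by unfold Pre_compute_warp_distribution; infer_instance

def pvWitness_compute_warp_distribution : List Int × Int := ([4, 8], 8)

def Spec_compute_warp_distribution (block_shape : List Int) (num_warps : Int) (out : List Int × List Int) : Prop := out = compute_warp_distribution_alt block_shape num_warps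
instance (block_shape : List Int) (num_warps : Int) (out : List Int × List Int) : Decidable (Spec_compute_warp_distribution block_shape num_warps out) := by unfold Spec_compute_warp_distribution; infer_instance

-- ===== CLAIM (what is proved, stated in full; the proofs are below) =====
def Claim_equal_compute_warp_distribution : Prop := ∀ (block_shape : List Int) (num_warps : Int), Dom_compute_warp_distribution block_shape num_warps → Pre_compute_warp_distribution block_shape num_warps → Spec_compute_warp_distribution block_shape num_warps (compute_warp_distribution block_shape num_warps)

-- ===== LEMMAS AND PROOFS =====

theorem pvFlog2_rec (x : Int) (hx : 2 ≤ x) :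
    pvFlog2 x = pvFlog2 (PySem.Int.floordiv x 2) + 1 := by
  have h2 : PySem.Int.floordiv x 2 = x / 2 := PySem.Int.floordiv_eq_ediv_of_pos (by omega)
  have hb := PySem.Int.bitLength_of_pos (n := x) (by omega)
  rw [h2] at hb ⊢
  unfold pvFlog2
  rw [if_pos hx]
  by_cases h : (2:Int) ≤ x / 2
  · have hb2 := PySem.Int.bitLength_of_pos (n := x / 2) (by omega)
    rw [if_pos h]
    omega
  · have hx2 : x / 2 = 1 := by omega
    rw [if_neg h]
    rw [hx2] at hb
    have h1 : PySem.Int.bitLength 1 = 1 := by decide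
    omega

theorem pvInnerA_scale (n : Nat) : ∀ (r : Int), r.toNat ≤ n → ∀ (b w : Int),
    pvInnerA b (w * 2) r
      = ((pvInnerA (PySem.Int.floordiv b 2) w r).1 * 2,
         (pvInnerA (PySem.Int.floordiv b 2) w r).2) := by
  induction n with
  | zero =>
    intro r hr b w
    have h1 : ¬ (1 < r ∧ w * 2 * 2 ≤ b) := by omega
    have h2 : ¬ (1 < r ∧ w * 2 ≤ PySem.Int.floordiv b 2) := by omega
    rw [pvInnerA, dif_neg h1]
    conv_rhs => rw [pvInnerA, dif_neg h2]
  | succ n ih =>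
    intro r hr b w
    have hb2 : PySem.Int.floordiv b 2 = b / 2 := PySem.Int.floordiv_eq_ediv_of_pos (by omega)
    have hr2 : PySem.Int.floordiv r 2 = r / 2 := PySem.Int.floordiv_eq_ediv_of_pos (by omega)
    by_cases hc : 1 < r ∧ w * 2 * 2 ≤ b
    · have hc' : 1 < r ∧ w * 2 ≤ PySem.Int.floordiv b 2 := by rw [hb2]; omega
      rw [pvInnerA, dif_pos hc]
      conv_rhs => rw [pvInnerA, dif_pos hc']
      exact ih (PySem.Int.floordiv r 2) (by rw [hr2]; omega) b (w * 2)
    · have hc' : ¬ (1 < r ∧ w * 2 ≤ PySem.Int.floordiv b 2) := by rw [hb2]; omega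
      rw [pvInnerA, dif_neg hc]
      conv_rhs => rw [pvInnerA, dif_neg hc']

theorem pvInnerA_closed (n : Nat) : ∀ (r : Int), r.toNat ≤ n → ∀ (b : Int),
    pvInnerA b 1 r
      = ((2:Int) ^ (min (pvFlog2 b) (pvFlog2 r)),
         PySem.Int.floordiv r ((2:Int) ^ (min (pvFlog2 b) (pvFlog2 r)))) := by
  induction n with
  | zero =>
    intro r hr b
    have hfr : pvFlog2 r = 0 := by unfold pvFlog2; rw [if_neg (by omega)]
    rw [pvInnerA, dif_neg (by omega), hfr]
    simp [PySem.Int.floordiv_eq_ediv_of_pos]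
  | succ n ih =>
    intro r hr b
    by_cases hrr : 1 < r
    · by_cases hbb : 2 ≤ b
      · -- main case: one doubling step
        have hr2 : PySem.Int.floordiv r 2 = r / 2 := PySem.Int.floordiv_eq_ediv_of_pos (by omega)
        have hstep : pvInnerA b 1 r = pvInnerA b (1 * 2) (PySem.Int.floordiv r 2) := by
          rw [pvInnerA, dif_pos ⟨hrr, by omega⟩]
        have hscale := pvInnerA_scale n (PySem.Int.floordiv r 2) (by rw [hr2]; omega) b 1
        have hih := ih (PySem.Int.floordiv r 2) (by rw [hr2]; omega) (PySem.Int.floordiv b 2)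
        have hfb := pvFlog2_rec b hbb
        have hfr := pvFlog2_rec r (by omega)
        set mb := pvFlog2 (PySem.Int.floordiv b 2) with hmb
        set mr := pvFlog2 (PySem.Int.floordiv r 2) with hmr
        have hmin : min (pvFlog2 b) (pvFlog2 r) = min mb mr + 1 := by omega
        rw [hstep, hscale, hih, hmin]
        simp only [Prod.mk.injEq]
        refine ⟨by rw [pow_succ], ?_⟩
        have hpow : (0:Int) < 2 ^ min mb mr := by positivity
        rw [PySem.Int.floordiv_eq_ediv_of_pos hpow, hr2,
            PySem.Int.floordiv_eq_ediv_of_pos (by positivity), pow_succ, mul_comm ((2:Int) ^ min mb mr) 2]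
        exact Int.ediv_ediv_of_nonneg (by norm_num : (0:Int) ≤ 2)
      · -- b < 2: no doubling possible
        have hfb : pvFlog2 b = 0 := by unfold pvFlog2; rw [if_neg (by omega)]
        rw [pvInnerA, dif_neg (by omega), hfb]
        simp [PySem.Int.floordiv_eq_ediv_of_pos]
    · -- r ≤ 1: loop never runs
      have hfr : pvFlog2 r = 0 := by unfold pvFlog2; rw [if_neg (by omega)]
      rw [pvInnerA, dif_neg (by omega), hfr]
      simp [PySem.Int.floordiv_eq_ediv_of_pos]

theorem pvAltLoop_length (l : List Int) (r : Int) : (pvAltLoop l r).1.length = l.length := by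
  induction l generalizing r with
  | nil => rfl
  | cons b rest ih => simp [pvAltLoop, ih]

theorem pvFoldA_eq (suf : List Int) : ∀ (pre done : List Int) (r : Int),
    done.length = pre.length →
    (List.range' pre.length suf.length).foldl (pvStepA (pre ++ suf))
        (done ++ List.replicate suf.length (1:Int), r)
      = (done ++ (pvAltLoop suf r).1, (pvAltLoop suf r).2) := by
  induction suf with
  | nil => intro pre done r h; simp [pvAltLoop]
  | cons b rest ih =>
    intro pre done r h
    rw [List.length_cons, List.range'_succ, List.replicate_succ, List.foldl_cons]
    have hget1 : (done ++ (1:Int) :: List.replicate rest.length 1).getD pre.length 0 = 1 := by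
      rw [← h, List.getD_eq_getElem?_getD, List.getElem?_append_right (le_refl _)]
      simp
    have hgetb : (pre ++ b :: rest).getD pre.length 0 = b := by
      rw [List.getD_eq_getElem?_getD, List.getElem?_append_right (le_refl _)]
      simp
    have hset : ∀ x : Int, (done ++ (1:Int) :: List.replicate rest.length 1).set pre.length x
        = (done ++ [x]) ++ List.replicate rest.length 1 := by
      intro x
      rw [List.set_append, if_neg (by omega)]
      simp [h]
    have hclosed := pvInnerA_closed r.toNat r (le_refl _) b
    show (List.range' (pre.length + 1) rest.length).foldl (pvStepA (pre ++ b :: rest))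
        (pvStepA (pre ++ b :: rest) (done ++ 1 :: List.replicate rest.length 1, r) pre.length)
      = _
    rw [pvStepA]
    simp only [hget1, hgetb, hclosed]
    have hlen : (done ++ [(2:Int) ^ min (pvFlog2 b) (pvFlog2 r)]).length = (pre ++ [b]).length := by
      simp [h]
    have := ih (pre ++ [b]) (done ++ [(2:Int) ^ min (pvFlog2 b) (pvFlog2 r)])
        (PySem.Int.floordiv r ((2:Int) ^ min (pvFlog2 b) (pvFlog2 r))) hlen
    rw [hset]
    have hrw : pvAltLoop (b :: rest) r
        = (((2:Int) ^ min (pvFlog2 b) (pvFlog2 r))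
              :: (pvAltLoop rest (PySem.Int.floordiv r ((2:Int) ^ min (pvFlog2 b) (pvFlog2 r)))).1,
           (pvAltLoop rest (PySem.Int.floordiv r ((2:Int) ^ min (pvFlog2 b) (pvFlog2 r)))).2) := rfl
    rw [hrw]
    simp only [List.length_append, List.length_cons, List.length_nil, List.append_assoc,
      List.cons_append, List.nil_append] at this ⊢
    exact this

theorem pvZipMap (f : Int → Int → Int) : ∀ (bs ws : List Int), ws.length = bs.length →
    (List.range bs.length).map (fun i => f (bs.getD i 0) (ws.getD i 0))
      = (bs.zip ws).map (fun p => f p.1 p.2) := by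
  intro bs
  induction bs with
  | nil => intro ws h; simp
  | cons b rest ih =>
    intro ws h
    match ws with
    | w :: ws' =>
      rw [List.length_cons, List.range_succ_eq_map]
      simp only [List.map_cons, List.map_map, List.zip_cons_cons]
      congr 1
      have := ih ws' (by simpa using h)
      simpa using this

theorem pvMain (bs : List Int) (nw : Int) :
    compute_warp_distribution bs nw = compute_warp_distribution_alt bs nw := by
  simp only [compute_warp_distribution, compute_warp_distribution_alt]
  have hfold := pvFoldA_eq bs [] [] nw rfl
  simp only [List.nil_append, List.length_nil] at hfold
  rw [List.range_eq_range', hfold, Prod.mk.eta]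
  have hwlen : (if 1 < (pvAltLoop bs nw).2 then
        (pvAltLoop bs nw).1.set (bs.length - 1) ((pvAltLoop bs nw).1.getD (bs.length - 1) 0 * (pvAltLoop bs nw).2)
      else (pvAltLoop bs nw).1).length = bs.length := by
    split <;> simp [pvAltLoop_length]
  rw [← List.range_eq_range', pvZipMap (fun x y => PySem.Int.floordiv (x + y - 1) y) bs _ hwlen]

-- ===== VERDICT (by name: the statement is the Claim_ definition above) =====
theorem compute_warp_distribution_spec : Claim_equal_compute_warp_distribution := by
  intro block_shape num_warps _ _
  unfold Spec_compute_warp_distribution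
  exact pvMain block_shape num_warps
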